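-- pv_equiv track=rewrite | github.com/Mgs25/Edabit_Challenges | isogram.py | cap_to_front
-- ===== SOURCE A (Python) =====
-- def cap_to_front(txt):
--     phrase = []
--     left = []
--
--     for letter in txt:
--         if letter.isupper():
--             phrase.append(letter)
--         else:
--             left.append(letter)
--
--     return "".join(phrase+left)
-- ===== SOURCE B (Python) =====
-- def cap_to_front(txt):
--     return "".join(sorted(txt, key=lambda c: not c.isupper()))
-- ===== Notes on version B (the rewrite author's own statement) =====
-- stated objective: idiomatic
-- what changed: Replaces the explicit two-bucket accumulation loop with a single stable sort keyed on the negated isupper predicate, so the grouping emerges from sort stability instead of hand-built lists.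
import Mathlib
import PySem

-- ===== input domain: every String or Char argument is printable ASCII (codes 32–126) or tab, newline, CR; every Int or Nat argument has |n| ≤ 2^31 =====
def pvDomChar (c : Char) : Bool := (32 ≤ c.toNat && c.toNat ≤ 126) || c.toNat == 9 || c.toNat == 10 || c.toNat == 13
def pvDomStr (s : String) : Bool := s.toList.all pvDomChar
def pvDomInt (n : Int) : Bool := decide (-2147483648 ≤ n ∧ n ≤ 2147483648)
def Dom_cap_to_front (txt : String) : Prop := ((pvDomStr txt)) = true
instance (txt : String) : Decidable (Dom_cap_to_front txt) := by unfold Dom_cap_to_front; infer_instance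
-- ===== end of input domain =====

-- B replaces A's hand-built two-bucket loop by one stable sort keyed on "not isupper" (idiomatic; same return value).

-- ===== PORT A =====
-- A: one pass accumulating (phrase, left), then join phrase+left.
def cap_to_front (txt : String) : String :=
  let st := txt.toList.foldl
    (fun (acc : List Char × List Char) letter =>
      if PySem.Chars.isupper letter then (acc.1 ++ [letter], acc.2)
      else (acc.1, acc.2 ++ [letter]))
    ([], [])
  String.mk (st.1 ++ st.2)

-- ===== PORT B =====
-- B: "".join(sorted(txt, key=lambda c: not c.isupper())) — PySem.List.sorted is Python's stable sort.
def cap_to_front_alt (txt : String) : String :=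
  String.mk (PySem.List.sorted txt.toList (fun c => !PySem.Chars.isupper c) false)

-- ===== PRECONDITION & SPEC =====
def Spec_cap_to_front (txt : String) (out : String) : Prop := out = cap_to_front_alt txt
instance (txt : String) (out : String) : Decidable (Spec_cap_to_front txt out) := by unfold Spec_cap_to_front; infer_instance

-- ===== CLAIM (what is proved, stated in full; the proofs are below) =====
def Claim_equal_cap_to_front : Prop := ∀ (txt : String), Dom_cap_to_front txt → Spec_cap_to_front txt (cap_to_front txt)

-- ===== LEMMAS AND PROOFS =====

-- the comparison B's insertion sort uses
def pvBefore (a b : Char) : Bool := decide ((!PySem.Chars.isupper a) < (!PySem.Chars.isupper b))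

-- inserting an uppercase char into (uppers ++ lowers) puts it after the uppers
lemma insert_upper (x : Char) (hx : PySem.Chars.isupper x = true) :
    ∀ (U L : List Char), (∀ u ∈ U, PySem.Chars.isupper u = true) →
      (∀ v ∈ L, PySem.Chars.isupper v = false) →
      PySem.List.insertBy pvBefore x (U ++ L) = U ++ [x] ++ L := by
  intro U
  induction U with
  | nil =>
    intro L _ hL
    cases L with
    | nil => rfl
    | cons l t =>
      have hl : PySem.Chars.isupper l = false := hL l (by simp)
      simp [PySem.List.insertBy, pvBefore, hx, hl]
  | cons u U ih =>
    intro L hU hL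
    have hu : PySem.Chars.isupper u = true := hU u (by simp)
    have : pvBefore x u = false := by simp [pvBefore, hx, hu]
    simp only [List.cons_append, PySem.List.insertBy, this, Bool.false_eq_true, if_false]
    rw [ih L (fun a ha => hU a (by simp [ha])) hL]

-- inserting a non-uppercase char goes to the very end
lemma insert_lower (x : Char) (hx : PySem.Chars.isupper x = false) (ys : List Char) :
    PySem.List.insertBy pvBefore x ys = ys ++ [x] := by
  apply PySem.List.insertBy_of_forall_not_before
  intro y _
  simp [pvBefore, hx]

-- the insertion-sort fold over any partitioned accumulator is the stable partition
lemma sorted_partition :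
    ∀ (l U L : List Char), (∀ u ∈ U, PySem.Chars.isupper u = true) →
      (∀ v ∈ L, PySem.Chars.isupper v = false) →
      l.foldl (fun acc x => PySem.List.insertBy pvBefore x acc) (U ++ L)
        = (U ++ l.filter (fun c => PySem.Chars.isupper c))
            ++ (L ++ l.filter (fun c => !PySem.Chars.isupper c)) := by
  intro l
  induction l with
  | nil => intro U L _ _; simp
  | cons x t ih =>
    intro U L hU hL
    by_cases hx : PySem.Chars.isupper x = true
    · rw [List.foldl_cons, insert_upper x hx U L hU hL]
      have := ih (U ++ [x]) L
        (by intro u hu; rcases List.mem_append.mp hu with h | h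
            · exact hU u h
            · simp at h; subst h; exact hx) hL
      simpa [hx, List.append_assoc] using this
    · have hx' : PySem.Chars.isupper x = false := by simpa using hx
      rw [List.foldl_cons, insert_lower x hx' (U ++ L), List.append_assoc]
      have := ih U (L ++ [x]) hU
        (by intro v hv; rcases List.mem_append.mp hv with h | h
            · exact hL v h
            · simp at h; subst h; exact hx')
      simpa [hx', List.append_assoc] using this

-- A's two-bucket fold computes the same two filters
lemma a_fold (l : List Char) :
    ∀ (p q : List Char),
      l.foldl (fun (acc : List Char × List Char) letter =>
        if PySem.Chars.isupper letter then (acc.1 ++ [letter], acc.2)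
        else (acc.1, acc.2 ++ [letter])) (p, q)
      = (p ++ l.filter (fun c => PySem.Chars.isupper c),
         q ++ l.filter (fun c => !PySem.Chars.isupper c)) := by
  induction l with
  | nil => intro p q; simp
  | cons x t ih =>
    intro p q
    by_cases hx : PySem.Chars.isupper x = true
    · simp [hx, ih, List.append_assoc]
    · have hx' : PySem.Chars.isupper x = false := by simpa using hx
      simp [hx', ih, List.append_assoc]

-- ===== VERDICT (by name: the statement is the Claim_ definition above) =====
theorem cap_to_front_spec : Claim_equal_cap_to_front := by
  intro txt _
  show cap_to_front txt = cap_to_front_alt txt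
  unfold cap_to_front cap_to_front_alt PySem.List.sorted
  have hb : (if (false : Bool) = true then fun a b : Char => decide ((!PySem.Chars.isupper b) < (!PySem.Chars.isupper a))
            else fun a b : Char => decide ((!PySem.Chars.isupper a) < (!PySem.Chars.isupper b))) = pvBefore := by
    funext a b; simp [pvBefore]
  simp only [hb]
  rw [a_fold txt.toList [] []]
  have := sorted_partition txt.toList [] [] (by simp) (by simp)
  simp only [List.nil_append] at this ⊢
  rw [this]
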